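-- pv_equiv track=rewrite | github.com/mightyoung/open-young-director | lib/crewai/src/crewai/content/video/seedance_adapter.py | generate_multi_modal_references
-- ===== SOURCE A (Python) =====
-- from typing import TYPE_CHECKING, Any, Dict, List, Optional
--
-- def generate_multi_modal_references(
--
--     character_refs: List[tuple] = None,
--     scene_refs: List[tuple] = None,
--     prop_refs: List[tuple] = None,
--     video_refs: List[tuple] = None,
--     audio_refs: List[tuple] = None,
-- ) -> str:
--     """生成多模态参考列表
--
--     Args:
--         character_refs: [(asset_id, description), ...]
--         scene_refs: [(asset_id, description), ...]
--         prop_refs: [(asset_id, description), ...]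
--         video_refs: [(asset_id, description), ...]  # 镜头运动参考
--         audio_refs: [(asset_id, description), ...]  # 音频参考
--
--     Returns:
--         格式化的多模态参考字符串
--     """
--     refs = []
--
--     if character_refs:
--         for asset_id, desc in character_refs:
--             refs.append(f"@图片{asset_id}[C{asset_id}] {desc}")
--
--     if scene_refs:
--         for asset_id, desc in scene_refs:
--             refs.append(f"@图片{asset_id}[S{asset_id}] {desc}")
--
--     if prop_refs:
--         for asset_id, desc in prop_refs:
--             refs.append(f"@图片{asset_id}[P{asset_id}] {desc}")
--
--     if video_refs:
--         for asset_id, desc in video_refs: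
--             refs.append(f"@视频{asset_id}[VID{asset_id}] {desc}")
--
--     if audio_refs:
--         for asset_id, desc in audio_refs:
--             refs.append(f"@音频{asset_id}[AUD{asset_id}] {desc}")
--
--     return "\n".join(refs) if refs else ""
-- ===== SOURCE B (Python) =====
-- def generate_multi_modal_references(
--     character_refs=None,
--     scene_refs=None,
--     prop_refs=None,
--     video_refs=None,
--     audio_refs=None,
-- ):
--     # Build the joined string directly, back to front, with a merging
--     # accumulator: no intermediate list of lines and no final join/guard.
--     def merge(x, y):
--         if not x:
--             return y
--         if not y:
--             return x
--         return x + "\n" + y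
--
--     def section(pairs, media, tag):
--         out = ""
--         for asset_id, desc in reversed(pairs or ()):
--             out = merge(f"@{media}{asset_id}[{tag}{asset_id}] {desc}", out)
--         return out
--
--     return merge(section(character_refs, "图片", "C"),
--            merge(section(scene_refs, "图片", "S"),
--            merge(section(prop_refs, "图片", "P"),
--            merge(section(video_refs, "视频", "VID"),
--                  section(audio_refs, "音频", "AUD")))))
-- ===== Notes on version B (the rewrite author's own statement) =====
-- stated objective: alternative
-- what changed: Instead of appending formatted lines to a list in five guarded loops and joining at the end, B builds the output string directly back-to-front with a smart 'merge' accumulator (empty-aware string concatenation), one section at a time, so no intermediate list, no join and no final emptiness conditional exist.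
import Mathlib
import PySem

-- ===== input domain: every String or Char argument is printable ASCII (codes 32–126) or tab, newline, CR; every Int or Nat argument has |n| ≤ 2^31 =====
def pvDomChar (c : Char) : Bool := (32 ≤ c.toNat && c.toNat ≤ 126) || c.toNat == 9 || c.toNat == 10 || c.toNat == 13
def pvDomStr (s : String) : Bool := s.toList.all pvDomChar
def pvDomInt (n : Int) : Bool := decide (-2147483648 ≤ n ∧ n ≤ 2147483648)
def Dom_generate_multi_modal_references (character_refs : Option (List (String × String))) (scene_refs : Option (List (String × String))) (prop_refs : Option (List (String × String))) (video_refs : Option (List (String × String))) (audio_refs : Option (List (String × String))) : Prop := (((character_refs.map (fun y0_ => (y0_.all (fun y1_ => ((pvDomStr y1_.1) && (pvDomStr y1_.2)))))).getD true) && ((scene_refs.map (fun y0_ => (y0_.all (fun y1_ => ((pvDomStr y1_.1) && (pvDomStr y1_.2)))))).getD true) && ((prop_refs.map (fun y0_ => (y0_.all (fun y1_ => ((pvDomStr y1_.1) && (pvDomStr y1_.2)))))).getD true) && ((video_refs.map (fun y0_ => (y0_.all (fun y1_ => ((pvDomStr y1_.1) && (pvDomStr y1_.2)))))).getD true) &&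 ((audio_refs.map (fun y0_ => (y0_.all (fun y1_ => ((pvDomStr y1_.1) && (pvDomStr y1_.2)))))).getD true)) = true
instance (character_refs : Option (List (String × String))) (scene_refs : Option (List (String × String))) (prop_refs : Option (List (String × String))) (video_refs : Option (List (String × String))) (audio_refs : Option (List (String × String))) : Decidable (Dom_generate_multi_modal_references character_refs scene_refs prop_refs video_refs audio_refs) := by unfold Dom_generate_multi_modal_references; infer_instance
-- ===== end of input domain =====

-- B builds the joined output string directly back-to-front with an empty-aware
-- 'merge' accumulator instead of A's list-of-lines plus final join (alternative; same-order output).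

-- Python truthiness of an Optional[list]: None and [] are falsy
def pyTruthyRefs (o : Option (List (String × String))) : Bool :=
  match o with
  | none => false
  | some l => !l.isEmpty

-- ===== PORT A =====
def generate_multi_modal_references (character_refs : Option (List (String × String))) (scene_refs : Option (List (String × String))) (prop_refs : Option (List (String × String))) (video_refs : Option (List (String × String))) (audio_refs : Option (List (String × String))) : String :=
  let refs : List String := []
  let refs := if pyTruthyRefs character_refs then
      (character_refs.getD []).foldl (fun r x => r ++ ["@图片" ++ x.1 ++ "[C" ++ x.1 ++ "] " ++ x.2]) refs
    else refs
  let refs := if pyTruthyRefs scene_refs then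
      (scene_refs.getD []).foldl (fun r x => r ++ ["@图片" ++ x.1 ++ "[S" ++ x.1 ++ "] " ++ x.2]) refs
    else refs
  let refs := if pyTruthyRefs prop_refs then
      (prop_refs.getD []).foldl (fun r x => r ++ ["@图片" ++ x.1 ++ "[P" ++ x.1 ++ "] " ++ x.2]) refs
    else refs
  let refs := if pyTruthyRefs video_refs then
      (video_refs.getD []).foldl (fun r x => r ++ ["@视频" ++ x.1 ++ "[VID" ++ x.1 ++ "] " ++ x.2]) refs
    else refs
  let refs := if pyTruthyRefs audio_refs then
      (audio_refs.getD []).foldl (fun r x => r ++ ["@音频" ++ x.1 ++ "[AUD" ++ x.1 ++ "] " ++ x.2]) refs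
    else refs
  if refs.isEmpty then "" else PySem.Str.join "\n" refs

-- ===== PORT B =====
-- Source B's merge: empty-aware concatenation with "\n" ('not x' on a str is x == "")
def pvMerge (x y : String) : String :=
  if x = "" then y else if y = "" then x else x ++ "\n" ++ y

-- Source B's section: loop over reversed(pairs or ()) folding merge into a string accumulator
def pvSection (pairs : Option (List (String × String))) (media tag : String) : String :=
  ((pairs.getD []).reverse).foldl
    (fun out x => pvMerge ("@" ++ media ++ x.1 ++ "[" ++ tag ++ x.1 ++ "] " ++ x.2) out) ""

def generate_multi_modal_references_alt (character_refs : Option (List (String × String))) (scene_refs : Option (List (String × String))) (prop_refs : Option (List (String × String))) (video_refs : Option (List (String × String))) (audio_refs : Option (List (String × String))) : String :=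
  pvMerge (pvSection character_refs "图片" "C")
    (pvMerge (pvSection scene_refs "图片" "S")
      (pvMerge (pvSection prop_refs "图片" "P")
        (pvMerge (pvSection video_refs "视频" "VID")
          (pvSection audio_refs "音频" "AUD"))))

-- ===== PRECONDITION & SPEC =====
def Spec_generate_multi_modal_references (character_refs : Option (List (String × String))) (scene_refs : Option (List (String × String))) (prop_refs : Option (List (String × String))) (video_refs : Option (List (String × String))) (audio_refs : Option (List (String × String))) (out : String) : Prop := out = generate_multi_modal_references_alt character_refs scene_refs prop_refs video_refs audio_refs
instance (character_refs : Option (List (String × String))) (scene_refs : Option (List (String × String))) (prop_refs : Option (List (String × String))) (video_refs : Option (List (String × String))) (audio_refs : Option (List (String × String))) (out : String) : Decidable (Spec_generate_multi_modal_references character_refs scene_refs prop_refs video_refs audio_refs out) := by unfold Spec_generate_multi_modal_references; infer_instance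

-- ===== CLAIM =====
def Claim_equal_generate_multi_modal_references : Prop := ∀ (character_refs : Option (List (String × String))) (scene_refs : Option (List (String × String))) (prop_refs : Option (List (String × String))) (video_refs : Option (List (String × String))) (audio_refs : Option (List (String × String))), Dom_generate_multi_modal_references character_refs scene_refs prop_refs video_refs audio_refs → Spec_generate_multi_modal_references character_refs scene_refs prop_refs video_refs audio_refs (generate_multi_modal_references character_refs scene_refs prop_refs video_refs audio_refs)

-- ===== LEMMAS AND PROOFS =====

-- intercalate on a two-or-more list
theorem pv_intercalate_cons_cons (sep a b : List Char) (t : List (List Char)) :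
    sep.intercalate (a::b::t) = a ++ sep ++ sep.intercalate (b::t) := by
  simp [List.intercalate, List.intersperse]

-- recursion equation for "\n".join
theorem pv_join_cons (a : String) (t : List String) :
    PySem.Str.join "\n" (a::t) = if t = [] then a else a ++ "\n" ++ PySem.Str.join "\n" t := by
  cases t with
  | nil => simp [PySem.Str.join, PySem.Chars.join, List.intercalate]
  | cons b t =>
    simp only [PySem.Str.join, PySem.Chars.join, List.map,
      pv_intercalate_cons_cons, if_neg (List.cons_ne_nil b t)]
    rw [String.ofList_append, String.ofList_append, String.ofList_toList, String.ofList_toList]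

-- a string with a nonempty prefix is nonempty
theorem pv_append_ne_empty (a b : String) (h : a ≠ "") : a ++ b ≠ "" := by
  intro hc
  apply h
  have hl := congrArg String.length hc
  simp only [String.length_append] at hl
  have h0 : ("" : String).length = 0 := rfl
  rw [h0] at hl
  exact String.length_eq_zero_iff.mp (by omega)

-- join of a list of nonempty strings is empty exactly on []
theorem pv_join_ne_empty (t : List String) (hne : ∀ x ∈ t, x ≠ "") (h : t ≠ []) :
    PySem.Str.join "\n" t ≠ "" := by
  cases t with
  | nil => exact absurd rfl h
  | cons a s =>
    rw [pv_join_cons]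
    by_cases hs : s = []
    · simpa [hs] using hne a (List.mem_cons_self)
    · rw [if_neg hs]
      exact pv_append_ne_empty _ _ (pv_append_ne_empty _ _ (hne a List.mem_cons_self))

-- merge of two joins of nonempty lines is the join of the concatenation
theorem pv_merge_join (A B : List String)
    (hA : ∀ x ∈ A, x ≠ "") (hB : ∀ x ∈ B, x ≠ "") :
    pvMerge (PySem.Str.join "\n" A) (PySem.Str.join "\n" B)
      = PySem.Str.join "\n" (A ++ B) := by
  induction A with
  | nil => simp [pvMerge, PySem.Str.join, PySem.Chars.join, List.intercalate]
  | cons a t ih =>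
    have ha : a ≠ "" := hA a List.mem_cons_self
    have ht : ∀ x ∈ t, x ≠ "" := fun x hx => hA x (List.mem_cons_of_mem _ hx)
    by_cases hb : B = []
    · subst hb
      rw [pvMerge, if_neg (pv_join_ne_empty _ hA (List.cons_ne_nil a t))]
      simp [PySem.Str.join, PySem.Chars.join, List.intercalate]
    · have hjB : PySem.Str.join "\n" B ≠ "" := pv_join_ne_empty B hB hb
      rw [pvMerge, if_neg (pv_join_ne_empty _ hA (List.cons_ne_nil a t)), if_neg hjB]
      by_cases hts : t = []
      · subst hts
        rw [pv_join_cons a [], if_pos rfl, List.cons_append, List.nil_append,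
          pv_join_cons a B, if_neg hb]
      · have htB : t ++ B ≠ [] := by simp [hts]
        rw [pv_join_cons a t, if_neg hts, List.cons_append, pv_join_cons a (t ++ B), if_neg htB]
        have : pvMerge (PySem.Str.join "\n" t) (PySem.Str.join "\n" B)
            = PySem.Str.join "\n" (t ++ B) := ih ht
        rw [pvMerge, if_neg (pv_join_ne_empty t ht hts), if_neg hjB] at this
        rw [← this]
        simp [String.append_assoc]

-- a formatted line is never empty (it starts with '@')
theorem pv_fmt_ne (m t : String) (x : String × String) :
    "@" ++ m ++ x.1 ++ "[" ++ t ++ x.1 ++ "] " ++ x.2 ≠ "" := by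
  intro h
  have := congrArg String.length h
  simp only [String.length_append] at this
  have h1 : ("@" : String).length = 1 := rfl
  have h0 : ("" : String).length = 0 := rfl
  omega

-- generic: the back-to-front merge fold equals join of the mapped lines
theorem pv_foldr_merge_eq_join (pairs : List (String × String)) (fmt : String × String → String)
    (hf : ∀ x, fmt x ≠ "") :
    pairs.foldr (fun x out => pvMerge (fmt x) out) ""
      = PySem.Str.join "\n" (pairs.map fmt) := by
  induction pairs with
  | nil => simp [PySem.Str.join, PySem.Chars.join, List.intercalate]
  | cons h t ih =>
    simp only [List.foldr_cons, List.map_cons, ih, pv_join_cons (fmt h) (t.map fmt)]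
    by_cases hts : t.map fmt = []
    · simp [hts, pvMerge, hf h, PySem.Str.join, PySem.Chars.join, List.intercalate]
    · rw [if_neg hts, pvMerge, if_neg (hf h),
        if_neg (pv_join_ne_empty _ (by rintro x hx; obtain ⟨y, _, rfl⟩ := List.mem_map.mp hx; exact hf y) hts)]

-- B's section in closed form
theorem pvSection_eq (o : Option (List (String × String))) (media tag : String) :
    pvSection o media tag
      = PySem.Str.join "\n"
          ((o.getD []).map (fun x => "@" ++ media ++ x.1 ++ "[" ++ tag ++ x.1 ++ "] " ++ x.2)) := by
  unfold pvSection
  rw [List.foldl_reverse]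
  exact pv_foldr_merge_eq_join (o.getD []) _ (fun x => pv_fmt_ne media tag x)

-- A's guarded append-loop equals appending the mapped block
theorem pv_guardedFoldl_eq_append_map (o : Option (List (String × String)))
    (f : String × String → String) (init : List String) :
    (if pyTruthyRefs o then (o.getD []).foldl (fun r x => r ++ [f x]) init else init)
      = init ++ (o.getD []).map f := by
  cases o with
  | none => simp [pyTruthyRefs]
  | some l =>
    cases l with
    | nil => simp [pyTruthyRefs]
    | cons a t =>
      simp only [pyTruthyRefs, Option.getD_some, List.isEmpty_cons, Bool.not_false, if_true]
      exact PySem.List.foldl_append_singleton_eq_map f (a :: t) init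

-- every line in any of the five mapped blocks is nonempty
theorem pv_mem_map_ne (m t : String) (l : List (String × String)) :
    ∀ x ∈ l.map (fun x => "@" ++ m ++ x.1 ++ "[" ++ t ++ x.1 ++ "] " ++ x.2), x ≠ "" := by
  rintro x hx
  obtain ⟨y, _, rfl⟩ := List.mem_map.mp hx
  exact pv_fmt_ne m t y

-- ===== VERDICT =====
theorem generate_multi_modal_references_spec : Claim_equal_generate_multi_modal_references := by
  intro c s p v a _
  unfold Spec_generate_multi_modal_references generate_multi_modal_references
    generate_multi_modal_references_alt
  -- rewrite B into a single join
  rw [pvSection_eq, pvSection_eq, pvSection_eq, pvSection_eq, pvSection_eq,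
    pv_merge_join _ _ (pv_mem_map_ne _ _ _) (pv_mem_map_ne _ _ _),
    pv_merge_join _ _ (pv_mem_map_ne _ _ _)
      (by intro x hx; rcases List.mem_append.mp hx with h | h
          exacts [pv_mem_map_ne _ _ _ x h, pv_mem_map_ne _ _ _ x h]),
    pv_merge_join _ _ (pv_mem_map_ne _ _ _)
      (by intro x hx; rcases List.mem_append.mp hx with h | h
          · exact pv_mem_map_ne _ _ _ x h
          · rcases List.mem_append.mp h with h | h
            exacts [pv_mem_map_ne _ _ _ x h, pv_mem_map_ne _ _ _ x h]),
    pv_merge_join _ _ (pv_mem_map_ne _ _ _)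
      (by intro x hx; rcases List.mem_append.mp hx with h | h
          · exact pv_mem_map_ne _ _ _ x h
          · rcases List.mem_append.mp h with h | h
            · exact pv_mem_map_ne _ _ _ x h
            · rcases List.mem_append.mp h with h | h
              exacts [pv_mem_map_ne _ _ _ x h, pv_mem_map_ne _ _ _ x h])]
  -- align the line-format functions (literal concatenation association)
  have hC : (fun x : String × String => "@" ++ "图片" ++ x.1 ++ "[" ++ "C" ++ x.1 ++ "] " ++ x.2)
      = (fun x : String × String => "@图片" ++ x.1 ++ "[C" ++ x.1 ++ "] " ++ x.2) := by
    funext x; rw [String.append_assoc (s₁ := "@" ++ "图片" ++ x.1) (s₂ := "[") (s₃ := "C")]; rfl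
  have hS : (fun x : String × String => "@" ++ "图片" ++ x.1 ++ "[" ++ "S" ++ x.1 ++ "] " ++ x.2)
      = (fun x : String × String => "@图片" ++ x.1 ++ "[S" ++ x.1 ++ "] " ++ x.2) := by
    funext x; rw [String.append_assoc (s₁ := "@" ++ "图片" ++ x.1) (s₂ := "[") (s₃ := "S")]; rfl
  have hP : (fun x : String × String => "@" ++ "图片" ++ x.1 ++ "[" ++ "P" ++ x.1 ++ "] " ++ x.2)
      = (fun x : String × String => "@图片" ++ x.1 ++ "[P" ++ x.1 ++ "] " ++ x.2) := by
    funext x; rw [String.append_assoc (s₁ := "@" ++ "图片" ++ x.1) (s₂ := "[") (s₃ := "P")]; rfl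
  have hV : (fun x : String × String => "@" ++ "视频" ++ x.1 ++ "[" ++ "VID" ++ x.1 ++ "] " ++ x.2)
      = (fun x : String × String => "@视频" ++ x.1 ++ "[VID" ++ x.1 ++ "] " ++ x.2) := by
    funext x; rw [String.append_assoc (s₁ := "@" ++ "视频" ++ x.1) (s₂ := "[") (s₃ := "VID")]; rfl
  have hA : (fun x : String × String => "@" ++ "音频" ++ x.1 ++ "[" ++ "AUD" ++ x.1 ++ "] " ++ x.2)
      = (fun x : String × String => "@音频" ++ x.1 ++ "[AUD" ++ x.1 ++ "] " ++ x.2) := by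
    funext x; rw [String.append_assoc (s₁ := "@" ++ "音频" ++ x.1) (s₂ := "[") (s₃ := "AUD")]; rfl
  simp only [pv_guardedFoldl_eq_append_map, hC, hS, hP, hV, hA,
    List.nil_append, List.append_assoc]
  by_cases h : ((c.getD []).map (fun x => "@图片" ++ x.1 ++ "[C" ++ x.1 ++ "] " ++ x.2) ++
      ((s.getD []).map (fun x => "@图片" ++ x.1 ++ "[S" ++ x.1 ++ "] " ++ x.2) ++
      ((p.getD []).map (fun x => "@图片" ++ x.1 ++ "[P" ++ x.1 ++ "] " ++ x.2) ++
      ((v.getD []).map (fun x => "@视频" ++ x.1 ++ "[VID" ++ x.1 ++ "] " ++ x.2) ++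
      (a.getD []).map (fun x => "@音频" ++ x.1 ++ "[AUD" ++ x.1 ++ "] " ++ x.2))))) = []
  · simp [h, PySem.Str.join, PySem.Chars.join, List.intercalate]
  · simp [h]
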